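-- pv_equiv track=rewrite | github.com/hoyeoon/CodingTest | NTS/1번.py | solution
-- ===== SOURCE A (Python) =====
-- from collections import deque
--
-- def solution(x, y):
--     direction = (1, 1)
--     city = []
--     visited = [0] * (x * y)
--     for i in range(x):
--         city.append(y * [0])
--
--     queue = deque()
--     queue.append((0, 0))
--     count = 0
--
--     while queue:
--         r, c = queue.popleft()
--         nr = r + direction[0]
--         nc = c + direction[1]
--
--         if nr >= x or nc >= y or nr < 0 or nc < 0:
--             nr = nr % x
--             nc = nc % y
--
--         if city[nr][nc] == 0 and city[nr][nc] != 1: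
--             city[nr][nc] = 1
--             queue.append((nr, nc))
--             visited[count] = 1
--             count += 1
--
--     if 0 in visited :
--         return False
--     return True
-- ===== SOURCE B (Python) =====
-- def solution(x, y):
--     # The diagonal wrap-walk visits every cell of the x*y grid iff gcd(x, y) == 1.
--     a, b = abs(x), abs(y)
--     while b:
--         a, b = b, a % b
--     return a == 1
-- ===== Notes on version B (the rewrite author's own statement) =====
-- stated objective: faster
-- what changed: Replaced the O(x*y) grid simulation (building the matrix and walking the diagonal until a repeat) by Euclid's algorithm: the walk covers all cells iff gcd(x,y)==1.
import Mathlib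
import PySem

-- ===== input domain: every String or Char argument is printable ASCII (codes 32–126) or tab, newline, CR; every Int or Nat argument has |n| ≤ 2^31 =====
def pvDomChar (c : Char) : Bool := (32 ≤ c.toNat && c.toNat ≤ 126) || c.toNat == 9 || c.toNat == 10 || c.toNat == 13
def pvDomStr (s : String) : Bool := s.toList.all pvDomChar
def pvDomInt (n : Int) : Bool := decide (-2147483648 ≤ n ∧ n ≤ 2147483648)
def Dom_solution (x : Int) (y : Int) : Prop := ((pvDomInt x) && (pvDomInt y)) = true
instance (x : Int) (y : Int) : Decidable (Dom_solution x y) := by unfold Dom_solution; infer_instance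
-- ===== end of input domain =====

-- B replaces A's diagonal-walk grid simulation by Euclid's gcd (the walk covers the grid
-- iff gcd(x,y) = 1); outside Pre_ (x ≤ 0 or y ≤ 0) A raises while B still returns a value.

-- ===== PORT A =====
-- The body of A's `while queue` loop, acting on the loop state (queue, city, visited, count);
-- once the queue is empty it is the identity (the loop has stopped). Python's lists (O(1)
-- indexed read/write) are ported as Arrays. The `getD`/`setIfInBounds` defaults and the
-- `.toNat` on indices are only reached outside Pre_solution (A raises there): inside
-- Pre_solution every index is provably nonnegative and in range.
def solutionStep (x y : Int)
    (s : List (Int × Int) × Array (Array Int) × Array Int × Int) :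
    List (Int × Int) × Array (Array Int) × Array Int × Int :=
  match s with
  | ([], city, visited, count) => ([], city, visited, count)
  | ((r, c) :: rest, city, visited, count) =>
    -- nr = r + direction[0]; nc = c + direction[1]; wrap by % on leaving the grid
    let nr0 : Int := r + 1
    let nc0 : Int := c + 1
    let p : Int × Int :=
      if nr0 ≥ x ∨ nc0 ≥ y ∨ nr0 < 0 ∨ nc0 < 0 then
        (PySem.Int.mod nr0 x, PySem.Int.mod nc0 y)
      else (nr0, nc0)
    let cell : Int := (city.getD p.1.toNat #[]).getD p.2.toNat 1
    if cell = 0 ∧ cell ≠ 1 then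
      (rest ++ [p],
       city.modify p.1.toNat (fun row => row.setIfInBounds p.2.toNat 1),
       visited.setIfInBounds count.toNat 1, count + 1)
    else
      (rest, city, visited, count)

def solution (x : Int) (y : Int) : Bool :=
  -- city = x rows of y * [0] (list repetition with a negative count is the empty list)
  let city : Array (Array Int) :=
    (PySem.List.pyRange 0 x 1).foldl (fun acc _ => acc.push (Array.replicate y.toNat 0)) #[]
  let visited : Array Int := Array.replicate (x * y).toNat 0
  -- `while queue:` run as x*y + 2 applications of the body (enough for the loop to stop by
  -- itself — the queue empties after at most lcm(x,y) + 1 markings — after which the body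
  -- is the identity)
  let res := (List.replicate ((x * y).toNat + 2) ()).foldl (fun s _ => solutionStep x y s)
    ([((0 : Int), (0 : Int))], city, visited, 0)
  if res.2.2.1.contains 0 then false else true

-- ===== PORT B =====
-- while b: a, b = b, a % b   (a, b ≥ 0, so Nat `%` is Python's `%` here);
-- `fuel` only makes the loop total: b strictly decreases, so |y| iterations always suffice.
def euclidGo (fuel a b : Nat) : Nat :=
  match fuel with
  | 0 => a
  | fuel + 1 => if b = 0 then a else euclidGo fuel b (a % b)

def solution_alt (x : Int) (y : Int) : Bool :=
  euclidGo y.natAbs x.natAbs y.natAbs == 1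

-- ===== PRECONDITION & SPEC =====
-- A raises on every input with x ≤ 0 or y ≤ 0 (ZeroDivisionError from the wrap modulo when
-- x = 0 or y = 0, IndexError on the empty grid otherwise); Pre_ excludes exactly those inputs.
def Pre_solution (x : Int) (y : Int) : Prop := 1 ≤ x ∧ 1 ≤ y
instance (x : Int) (y : Int) : Decidable (Pre_solution x y) := by unfold Pre_solution; infer_instance
def pvWitness_solution : Int × Int := (4, 6)

def Spec_solution (x : Int) (y : Int) (out : Bool) : Prop := out = solution_alt x y
instance (x : Int) (y : Int) (out : Bool) : Decidable (Spec_solution x y out) := by unfold Spec_solution; infer_instance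

-- ===== CLAIM (what is proved, stated in full; the proofs are below) =====
def Claim_equal_solution : Prop := ∀ (x : Int) (y : Int), Dom_solution x y → Pre_solution x y → Spec_solution x y (solution x y)

-- ===== LEMMAS AND PROOFS =====

-- The marked city after the walk has performed k marking steps (step j marks cell (j % a, j % b)).
def cityKA (a b : Nat) : Nat → Array (Array Int)
  | 0 => Array.mk (List.replicate a (Array.mk (List.replicate b 0)))
  | k + 1 => (cityKA a b k).modify ((k + 1) % a) (fun row => row.setIfInBounds ((k + 1) % b) 1)

-- visited after k marking steps
def visitedK (a b k : Nat) : List Int := List.replicate k 1 ++ List.replicate (a * b - k) 0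

theorem euclidGo_eq_gcd (fuel a b : Nat) (hf : b ≤ fuel) : euclidGo fuel a b = Nat.gcd a b := by
  induction fuel generalizing a b with
  | zero => have : b = 0 := by omega
            subst this; simp [euclidGo]
  | succ f ih =>
    by_cases hb : b = 0
    · subst hb; simp [euclidGo]
    · have hlt : a % b ≤ f := by have := Nat.mod_lt a (Nat.pos_of_ne_zero hb); omega
      simp only [euclidGo, hb, if_false]
      rw [ih b (a % b) hlt, Nat.gcd_comm b (a % b), ← Nat.gcd_rec b a, Nat.gcd_comm b a]

theorem aGetD_modify_lt {α : Type} (m : Array α) (i j : Nat) (f : α → α) (d : α) (h : i < m.size) :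
    (m.modify i f).getD j d = if j = i then f (m.getD j d) else m.getD j d := by
  simp only [Array.getD_eq_getD_getElem?, Array.getElem?_modify]
  by_cases h1 : i = j
  · subst h1
    simp [Array.getElem?_eq_getElem h]
  · rw [if_neg h1, if_neg (fun hh => h1 hh.symm)]

theorem aGetD_set_lt {α : Type} (m : Array α) (i j : Nat) (v d : α) (h : i < m.size) :
    (m.setIfInBounds i v).getD j d = if j = i then v else m.getD j d := by
  simp only [Array.getD_eq_getD_getElem?, Array.getElem?_setIfInBounds]
  by_cases h1 : i = j
  · subst h1
    simp [h]
  · rw [if_neg h1, if_neg (fun hh => h1 hh.symm)]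

theorem set_replicate_append {α : Type} (k : Nat) (x v : α) (l : List α) :
    (List.replicate k x ++ l).set k v = List.replicate k x ++ l.set 0 v := by
  induction k with
  | zero => simp
  | succ n ih => simp [List.replicate_succ, ih]

theorem cityKA_shape (a b : Nat) (ha : 0 < a) (k : Nat) :
    (cityKA a b k).size = a ∧ ∀ r, r < a → ((cityKA a b k).getD r #[]).size = b := by
  induction k with
  | zero =>
    refine ⟨by simp [cityKA], fun r hr => ?_⟩
    simp [cityKA, Array.getD_eq_getD_getElem?, hr]
  | succ k ih =>
    have hia : (k + 1) % a < a := Nat.mod_lt _ ha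
    have hlt : (k + 1) % a < (cityKA a b k).size := by rw [ih.1]; exact hia
    refine ⟨?_, fun r hr => ?_⟩
    · simp only [cityKA, Array.size_modify]; exact ih.1
    · simp only [cityKA]
      rw [aGetD_modify_lt _ _ _ _ _ hlt]
      by_cases hra : r = (k + 1) % a
      · rw [if_pos hra, Array.size_setIfInBounds, hra]; exact ih.2 _ hia
      · rw [if_neg hra]; exact ih.2 _ hr

theorem cityKA_get (a b : Nat) (ha : 0 < a) (hb : 0 < b) (k r c : Nat) (hr : r < a) (hc : c < b) :
    ((cityKA a b k).getD r #[]).getD c (1 : Int)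
      = if ∃ j < k + 1, 0 < j ∧ j % a = r ∧ j % b = c then 1 else 0 := by
  induction k with
  | zero =>
    rw [if_neg (by rintro ⟨j, hj1, hj0, -⟩; omega)]
    simp [cityKA, Array.getD_eq_getD_getElem?, hr, hc]
  | succ k ih =>
    have hsh := cityKA_shape a b ha k
    have hia : (k + 1) % a < a := Nat.mod_lt _ ha
    have hib : (k + 1) % b < b := Nat.mod_lt _ hb
    have hlta : (k + 1) % a < (cityKA a b k).size := by rw [hsh.1]; exact hia
    have hltb : (k + 1) % b < ((cityKA a b k).getD r #[]).size := by
      rw [hsh.2 _ hr]; exact hib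
    simp only [cityKA]
    rw [aGetD_modify_lt _ _ _ _ _ hlta]
    by_cases hra : r = (k + 1) % a
    · rw [if_pos hra, aGetD_set_lt _ _ _ _ _ hltb]
      by_cases hcb : c = (k + 1) % b
      · rw [if_pos hcb, if_pos ⟨k + 1, by omega, by omega, hra.symm, hcb.symm⟩]
      · rw [if_neg hcb, ih]
        by_cases hP : ∃ j < k + 1, 0 < j ∧ j % a = r ∧ j % b = c
        · obtain ⟨j, hj1, hj2⟩ := hP
          rw [if_pos ⟨j, hj1, hj2⟩, if_pos ⟨j, by omega, hj2⟩]
        · rw [if_neg hP, if_neg ?_]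
          rintro ⟨j, hj1, hj0, hj2, hj3⟩
          by_cases hjk : j = k + 1
          · exact hcb (by rw [← hj3, hjk])
          · exact hP ⟨j, by omega, hj0, hj2, hj3⟩
    · rw [if_neg hra, ih]
      by_cases hP : ∃ j < k + 1, 0 < j ∧ j % a = r ∧ j % b = c
      · obtain ⟨j, hj1, hj2⟩ := hP
        rw [if_pos ⟨j, hj1, hj2⟩, if_pos ⟨j, by omega, hj2⟩]
      · rw [if_neg hP, if_neg ?_]
        rintro ⟨j, hj1, hj0, hj2, hj3⟩
        by_cases hjk : j = k + 1
        · exact hra (by rw [← hj2, hjk])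
        · exact hP ⟨j, by omega, hj0, hj2, hj3⟩

theorem mod_succ_mod (k a : Nat) : (k % a + 1) % a = (k + 1) % a := by
  rw [Nat.add_mod k 1 a, Nat.add_mod (k % a) 1 a, Nat.mod_mod_of_dvd k (dvd_refl a)]

theorem next_cell (a b k : Nat) :
    (if ((k % a : Nat) : Int) + 1 ≥ (a : Int) ∨ ((k % b : Nat) : Int) + 1 ≥ (b : Int) ∨
        ((k % a : Nat) : Int) + 1 < 0 ∨ ((k % b : Nat) : Int) + 1 < 0 then
      (PySem.Int.mod (((k % a : Nat) : Int) + 1) (a : Int),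
       PySem.Int.mod (((k % b : Nat) : Int) + 1) (b : Int))
    else (((k % a : Nat) : Int) + 1, ((k % b : Nat) : Int) + 1))
    = ((((k + 1) % a : Nat) : Int), (((k + 1) % b : Nat) : Int)) := by
  have ea : ((k % a : Nat) : Int) + 1 = ((k % a + 1 : Nat) : Int) := by push_cast; ring
  have eb : ((k % b : Nat) : Int) + 1 = ((k % b + 1 : Nat) : Int) := by push_cast; ring
  split_ifs with h
  · rw [ea, eb, PySem.Int.mod_natCast, PySem.Int.mod_natCast, mod_succ_mod, mod_succ_mod]
  · rw [not_or, not_or, not_or] at h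
    obtain ⟨h1, h2, -, -⟩ := h
    have ka : k % a + 1 < a := by omega
    have kb : k % b + 1 < b := by omega
    rw [ea, eb, ← mod_succ_mod k a, ← mod_succ_mod k b,
        Nat.mod_eq_of_lt ka, Nat.mod_eq_of_lt kb]

theorem visitedK_set (a b k : Nat) (hk : k < a * b) :
    (visitedK a b k).set k 1 = visitedK a b (k + 1) := by
  unfold visitedK
  have h1 : (a * b - k) = (a * b - (k + 1)) + 1 := by omega
  rw [h1, List.replicate_succ, set_replicate_append]
  simp [List.replicate_succ']

theorem foldl_step_nil (x y : Int) (n : Nat) (c : Array (Array Int)) (v : Array Int) (cnt : Int) :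
    (List.replicate n ()).foldl (fun s _ => solutionStep x y s) ([], c, v, cnt) = ([], c, v, cnt) := by
  induction n with
  | zero => rfl
  | succ n ih => rw [List.replicate_succ, List.foldl_cons]; exact ih

theorem loop_run (a b : Nat) (ha : 0 < a) (hb : 0 < b) (k fuel : Nat)
    (hk : k ≤ Nat.lcm a b) (hf : Nat.lcm a b - k + 1 ≤ fuel) :
    ((List.replicate fuel ()).foldl (fun s _ => solutionStep (a : Int) (b : Int) s)
        ([(((k % a : Nat) : Int), ((k % b : Nat) : Int))], cityKA a b k,
         Array.mk (visitedK a b k), (k : Int))).2.2.1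
      = Array.mk (visitedK a b (Nat.lcm a b)) := by
  have hLab : Nat.lcm a b ≤ a * b :=
    Nat.le_of_dvd (Nat.mul_pos ha hb) (Nat.lcm_dvd (dvd_mul_right a b) (dvd_mul_left b a))
  have hLpos : 0 < Nat.lcm a b := Nat.lcm_pos ha hb
  induction fuel generalizing k with
  | zero => omega
  | succ fuel ih =>
    have hia : (k + 1) % a < a := Nat.mod_lt _ ha
    have hib : (k + 1) % b < b := Nat.mod_lt _ hb
    rw [List.replicate_succ, List.foldl_cons]
    by_cases hkL : k < Nat.lcm a b
    · -- cell (k+1) is unmarked: a repeat before step lcm(a,b)+1 is impossible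
      have hnm : ¬ ∃ j < k + 1, 0 < j ∧ j % a = (k + 1) % a ∧ j % b = (k + 1) % b := by
        rintro ⟨j, hj1, hj0, hja, hjb⟩
        have hda : a ∣ (k + 1) - j := (Nat.modEq_iff_dvd' (by omega)).mp hja
        have hdb : b ∣ (k + 1) - j := (Nat.modEq_iff_dvd' (by omega)).mp hjb
        have hdl : Nat.lcm a b ∣ (k + 1) - j := Nat.lcm_dvd hda hdb
        have := Nat.le_of_dvd (by omega) hdl
        omega
      have hstep : solutionStep (a : Int) (b : Int)
          ([(((k % a : Nat) : Int), ((k % b : Nat) : Int))], cityKA a b k,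
           Array.mk (visitedK a b k), (k : Int))
          = ([((((k + 1) % a : Nat) : Int), (((k + 1) % b : Nat) : Int))], cityKA a b (k + 1),
             Array.mk (visitedK a b (k + 1)), ((k + 1 : Nat) : Int)) := by
        simp only [solutionStep]
        rw [next_cell a b k]
        rw [show (((((k + 1) % a : Nat) : Int), (((k + 1) % b : Nat) : Int)).1).toNat
              = (k + 1) % a from Int.toNat_natCast _]
        rw [show (((((k + 1) % a : Nat) : Int), (((k + 1) % b : Nat) : Int)).2).toNat
              = (k + 1) % b from Int.toNat_natCast _]
        rw [cityKA_get a b ha hb k ((k + 1) % a) ((k + 1) % b) hia hib]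
        rw [if_neg hnm, if_pos (show (0 : Int) = 0 ∧ (0 : Int) ≠ 1 by norm_num)]
        rw [show ((k : Int)).toNat = k from Int.toNat_natCast _]
        rw [List.setIfInBounds_toArray, visitedK_set a b k (by omega)]
        have hc1 : (k : Int) + 1 = ((k + 1 : Nat) : Int) := by push_cast; ring
        rw [hc1]
        rfl
      simp only [hstep]
      exact ih (k + 1) (by omega) (by omega)
    · -- k = lcm(a,b): the next cell is the one marked at step 1, so the loop stops
      have hkeq : k = Nat.lcm a b := by omega
      obtain ⟨m, hm⟩ := Nat.dvd_lcm_left a b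
      obtain ⟨n, hn⟩ := Nat.dvd_lcm_right a b
      have hmk : ∃ j < k + 1, 0 < j ∧ j % a = (k + 1) % a ∧ j % b = (k + 1) % b := by
        refine ⟨1, by omega, by omega, ?_, ?_⟩
        · rw [hkeq, hm]
          conv_rhs => rw [Nat.add_comm]
          rw [Nat.add_mul_mod_self_left]
        · rw [hkeq, hn]
          conv_rhs => rw [Nat.add_comm]
          rw [Nat.add_mul_mod_self_left]
      have hstep : solutionStep (a : Int) (b : Int)
          ([(((k % a : Nat) : Int), ((k % b : Nat) : Int))], cityKA a b k,
           Array.mk (visitedK a b k), (k : Int))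
          = ([], cityKA a b k, Array.mk (visitedK a b k), (k : Int)) := by
        simp only [solutionStep]
        rw [next_cell a b k]
        rw [show (((((k + 1) % a : Nat) : Int), (((k + 1) % b : Nat) : Int)).1).toNat
              = (k + 1) % a from Int.toNat_natCast _]
        rw [show (((((k + 1) % a : Nat) : Int), (((k + 1) % b : Nat) : Int)).2).toNat
              = (k + 1) % b from Int.toNat_natCast _]
        rw [cityKA_get a b ha hb k ((k + 1) % a) ((k + 1) % b) hia hib]
        rw [if_pos hmk, if_neg (show ¬ ((1 : Int) = 0 ∧ (1 : Int) ≠ 1) by norm_num)]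
      simp only [hstep]
      rw [foldl_step_nil, hkeq]

theorem foldl_push_const {α β : Type} (l : List β) (v : α) (acc : Array α) :
    l.foldl (fun acc _ => acc.push v) acc = Array.mk (acc.toList ++ List.replicate l.length v) := by
  induction l generalizing acc with
  | nil => simp
  | cons h t ih =>
    rw [List.foldl_cons, ih]
    simp [Array.toList_push, List.replicate_succ, List.append_assoc]

theorem main_nat (a b : Nat) (ha : 0 < a) (hb : 0 < b) :
    solution (a : Int) (b : Int) = (euclidGo b a b == 1) := by
  have hLab : Nat.lcm a b ≤ a * b :=
    Nat.le_of_dvd (Nat.mul_pos ha hb) (Nat.lcm_dvd (dvd_mul_right a b) (dvd_mul_left b a))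
  have hgl := Nat.gcd_mul_lcm a b
  simp only [solution]
  have hab : (((a : Int) * (b : Int))).toNat = a * b := by
    rw [← Nat.cast_mul, Int.toNat_natCast]
  have hcity : ((PySem.List.pyRange 0 (a : Int) 1).foldl
      (fun acc _ => acc.push (Array.replicate ((b : Int)).toNat 0)) #[]) = cityKA a b 0 := by
    rw [foldl_push_const]
    simp only [List.nil_append, PySem.List.length_pyRange_one, Int.sub_zero,
      Int.toNat_natCast, cityKA]
    exact congrArg (fun r => Array.mk (List.replicate a r)) (List.toArray_replicate b (0 : Int)).symm
  have hvis : Array.replicate (((a : Int) * (b : Int))).toNat (0 : Int)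
      = Array.mk (visitedK a b 0) := by
    rw [hab, show visitedK a b 0 = List.replicate (a * b) (0 : Int) from by simp [visitedK],
        ← List.toArray_replicate]
  have hfuel : (((a : Int) * (b : Int))).toNat + 2 = a * b + 2 := by rw [hab]
  have hzero : [((0 : Int), (0 : Int))] = [(((0 % a : Nat) : Int), ((0 % b : Nat) : Int))] := by
    simp [Nat.zero_mod]
  rw [hcity, hvis, hfuel, hzero]
  have h0 : ((0 : Nat) : Int) = (0 : Int) := by norm_num
  rw [← h0, loop_run a b ha hb 0 (a * b + 2) (by omega) (by omega)]
  rw [euclidGo_eq_gcd b a b (le_refl b), Array.contains_eq_mem]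
  by_cases hg : Nat.gcd a b = 1
  · have hL : Nat.lcm a b = a * b := by rw [hg, one_mul] at hgl; exact hgl
    have h : (0 : Int) ∉ Array.mk (visitedK a b (Nat.lcm a b)) := by
      rw [Array.mem_def]
      simp [visitedK, List.mem_replicate, hL]
    simp [h, hg]
  · have hg2 : 2 ≤ Nat.gcd a b := by
      have := Nat.gcd_pos_of_pos_left b ha
      omega
    have hL1 : 1 ≤ Nat.lcm a b := Nat.lcm_pos ha hb
    have hlt : Nat.lcm a b < a * b := by
      have h2 : 2 * Nat.lcm a b ≤ Nat.gcd a b * Nat.lcm a b := Nat.mul_le_mul_right _ hg2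
      omega
    have h : (0 : Int) ∈ Array.mk (visitedK a b (Nat.lcm a b)) := by
      rw [Array.mem_def]
      simp [visitedK, List.mem_replicate]
      omega
    simp [h, hg]

-- ===== VERDICT (by name: the statement is the Claim_ definition above) =====
theorem solution_spec : Claim_equal_solution := by
  intro x y _ hpre
  obtain ⟨hx, hy⟩ := hpre
  unfold Spec_solution solution_alt
  have hxa : x = (x.natAbs : Int) := by omega
  have hya : y = (y.natAbs : Int) := by omega
  rw [hxa, hya, main_nat x.natAbs y.natAbs (by omega) (by omega)]
  simp only [Int.natAbs_natCast]
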